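-- pv_equiv track=rewrite | github.com/Satorica/Citation_Intent_Classification | test.py | process_intents
-- ===== SOURCE A (Python) =====
-- def process_intents(data):
--
--     data = [item for item in data if item['intent'] != 'HalfExtend']
--
--     for item in data:
--         if item['intent'] == 'Extends' or item['intent'] == 'Extend':
--             item['intent'] = 'Extend'
--         elif item['intent'] == 'HalfExtend':
--             data.remove(item)
--         else:
--             item['intent'] = 'NotExtend'
--     return data
-- ===== SOURCE B (Python) =====
-- RELABEL = {'Extends': 'Extend', 'Extend': 'Extend'}
--
-- def process_intents(data):
--     # Backwards index walk: build the output back-to-front with a table lookup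
--     # instead of branch chains, then reverse once. Mutates kept dicts in place
--     # (same in-place mutation as A) and returns a fresh list.
--     result = []
--     i = len(data) - 1
--     while i >= 0:
--         item = data[i]
--         intent = item['intent']
--         if intent != 'HalfExtend':
--             item['intent'] = RELABEL.get(intent, 'NotExtend')
--             result.append(item)
--         i -= 1
--     result.reverse()
--     return result
-- ===== Notes on version B (the rewrite author's own statement) =====
-- stated objective: alternative
-- what changed: A filters with a comprehension and then runs a second forward relabelling loop with an or-chain of branches (and a dead remove branch); B is a backwards index while-loop that relabels via a lookup table (RELABEL.get with default) and builds the output back-to-front, reversing once at the end.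
import Mathlib
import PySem

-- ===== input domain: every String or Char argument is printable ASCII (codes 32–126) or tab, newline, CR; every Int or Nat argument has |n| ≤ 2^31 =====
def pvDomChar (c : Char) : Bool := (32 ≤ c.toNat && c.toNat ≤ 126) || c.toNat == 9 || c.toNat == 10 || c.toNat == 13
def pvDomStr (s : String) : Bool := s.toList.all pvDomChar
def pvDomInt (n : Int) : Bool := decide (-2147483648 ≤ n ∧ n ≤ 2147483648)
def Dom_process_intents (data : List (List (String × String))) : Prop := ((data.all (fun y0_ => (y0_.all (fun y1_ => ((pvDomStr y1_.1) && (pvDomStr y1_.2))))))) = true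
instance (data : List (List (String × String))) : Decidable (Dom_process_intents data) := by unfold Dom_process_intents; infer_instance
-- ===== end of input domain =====

-- ===== PORT A =====
-- B replaces A's filter comprehension + forward relabel loop (or-chain branches, dead remove branch)
-- by a backwards index walk with a lookup table, building the result back-to-front and reversing once;
-- both mutate the kept dicts in place in Python (equivalence proved here is about the return value,
-- B performs the same in-place mutation of the kept dicts).
-- The 'data.remove(item)' branch of A is unreachable after the filter; kept as the acc-unchanged branch.
-- item['intent'] raises KeyError when the key is missing; Pre_ excludes that, so getD with default "" is exact on Pre_.
def process_intents (data : List (List (String × String))) : List (List (String × String)) :=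
  let data1 := data.filter (fun item => PySem.Dict.getD (PySem.Dict.mk item) "intent" "" != "HalfExtend")
  data1.foldl (fun acc item =>
    let v := PySem.Dict.getD (PySem.Dict.mk item) "intent" ""
    if v = "Extends" ∨ v = "Extend" then acc ++ [(PySem.Dict.insert (PySem.Dict.mk item) "intent" "Extend").items]
    else if v = "HalfExtend" then acc  -- data.remove(item): dead after the filter
    else acc ++ [(PySem.Dict.insert (PySem.Dict.mk item) "intent" "NotExtend").items]) []

-- ===== PORT B =====
-- module-level table RELABEL = {'Extends': 'Extend', 'Extend': 'Extend'}
def RELABEL : PySem.Dict String String := PySem.Dict.mk [("Extends", "Extend"), ("Extend", "Extend")]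

-- the while-loop 'i = len(data)-1; while i >= 0: … ; i -= 1' visits data back-to-front:
-- ported as a fold over data.reverse (exact: each step reads data[i], appends or skips)
def process_intents_alt (data : List (List (String × String))) : List (List (String × String)) :=
  let result := data.reverse.foldl (fun result item =>
    let intent := PySem.Dict.getD (PySem.Dict.mk item) "intent" ""
    if intent != "HalfExtend" then
      result ++ [(PySem.Dict.insert (PySem.Dict.mk item) "intent" (PySem.Dict.getD RELABEL intent "NotExtend")).items]
    else result) []
  result.reverse

-- ===== PRECONDITION & SPEC =====
-- Pre_ excludes items without an 'intent' key, on which the Python A (and B) raises KeyError.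
def Pre_process_intents (data : List (List (String × String))) : Prop :=
  ∀ item ∈ data, (PySem.Dict.get? (PySem.Dict.mk item) "intent").isSome
instance (data : List (List (String × String))) : Decidable (Pre_process_intents data) := by
  unfold Pre_process_intents; infer_instance
def pvWitness_process_intents : (List (List (String × String))) :=
  [[("intent", "Extends")], [("intent", "HalfExtend")], [("intent", "Uses"), ("x", "y")]]
def Spec_process_intents (data : List (List (String × String))) (out : List (List (String × String))) : Prop := out = process_intents_alt data
instance (data : List (List (String × String))) (out : List (List (String × String))) : Decidable (Spec_process_intents data out) := by unfold Spec_process_intents; infer_instance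

-- ===== CLAIM (what is proved, stated in full; the proofs are below) =====
def Claim_equal_process_intents : Prop := ∀ (data : List (List (String × String))), Dom_process_intents data → Pre_process_intents data → Spec_process_intents data (process_intents data)

-- ===== LEMMAS AND PROOFS =====
-- one kept item, as both sides produce it (relabel table vs or-chain give the same string)
def pvKeep (item : List (String × String)) : Option (List (String × String)) :=
  let v := PySem.Dict.getD (PySem.Dict.mk item) "intent" ""
  if v = "HalfExtend" then none
  else some (PySem.Dict.insert (PySem.Dict.mk item) "intent"
      (if v = "Extends" ∨ v = "Extend" then "Extend" else "NotExtend")).items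

-- the table lookup equals the or-chain branch value
lemma relabel_eq (v : String) :
    PySem.Dict.getD RELABEL v "NotExtend"
      = if v = "Extends" ∨ v = "Extend" then "Extend" else "NotExtend" := by
  by_cases h1 : v = "Extends"
  · subst h1; decide
  · by_cases h2 : v = "Extend"
    · subst h2; decide
    · have : (("Extends" : String) == v) = false := by
        simp [beq_iff_eq]; exact fun h => h1 h.symm
      have h2' : (("Extend" : String) == v) = false := by
        simp [beq_iff_eq]; exact fun h => h2 h.symm
      simp [RELABEL, PySem.Dict.getD, PySem.Dict.get?, PySem.Dict.mk, this, h2', h1, h2]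

-- A's filtered-then-relabelled fold computes filterMap pvKeep
lemma a_eq_filterMap (l acc : List (List (String × String))) :
    l.foldl (fun acc item =>
        let v := PySem.Dict.getD (PySem.Dict.mk item) "intent" ""
        if v = "Extends" ∨ v = "Extend" then acc ++ [(PySem.Dict.insert (PySem.Dict.mk item) "intent" "Extend").items]
        else if v = "HalfExtend" then acc
        else acc ++ [(PySem.Dict.insert (PySem.Dict.mk item) "intent" "NotExtend").items]) acc
      = acc ++ l.filterMap pvKeep := by
  induction l generalizing acc with
  | nil => simp
  | cons h t ih =>
    simp only [List.foldl_cons, List.filterMap_cons, ih]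
    by_cases he : PySem.Dict.getD (PySem.Dict.mk h) "intent" "" = "Extends" ∨ PySem.Dict.getD (PySem.Dict.mk h) "intent" "" = "Extend"
    · have hne : PySem.Dict.getD (PySem.Dict.mk h) "intent" "" ≠ "HalfExtend" := by
        rcases he with h1 | h1 <;> simp [h1]
      have hk : pvKeep h = some (PySem.Dict.insert (PySem.Dict.mk h) "intent" "Extend").items := by
        simp [pvKeep, hne, he]
      simp [he, hk]
    · by_cases hh : PySem.Dict.getD (PySem.Dict.mk h) "intent" "" = "HalfExtend"
      · have hk : pvKeep h = none := by simp [pvKeep, hh]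
        simp [he, hh, hk]
      · have hk : pvKeep h = some (PySem.Dict.insert (PySem.Dict.mk h) "intent" "NotExtend").items := by
          simp [pvKeep, hh, he]
        simp [he, hh, hk]

-- B's backwards append fold computes (filterMap pvKeep of the traversed list)
lemma b_eq_filterMap (l acc : List (List (String × String))) :
    l.foldl (fun result item =>
        let intent := PySem.Dict.getD (PySem.Dict.mk item) "intent" ""
        if intent != "HalfExtend" then
          result ++ [(PySem.Dict.insert (PySem.Dict.mk item) "intent" (PySem.Dict.getD RELABEL intent "NotExtend")).items]
        else result) acc
      = acc ++ l.filterMap pvKeep := by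
  induction l generalizing acc with
  | nil => simp
  | cons h t ih =>
    simp only [List.foldl_cons, List.filterMap_cons, ih]
    by_cases hh : PySem.Dict.getD (PySem.Dict.mk h) "intent" "" = "HalfExtend"
    · have hk : pvKeep h = none := by simp [pvKeep, hh]
      simp [hh, hk]
    · have hk : pvKeep h = some (PySem.Dict.insert (PySem.Dict.mk h) "intent"
          (if PySem.Dict.getD (PySem.Dict.mk h) "intent" "" = "Extends" ∨ PySem.Dict.getD (PySem.Dict.mk h) "intent" "" = "Extend" then "Extend" else "NotExtend")).items := by
        simp [pvKeep, hh]
      simp [hh, hk, relabel_eq]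

-- filter before A's loop does not change its filterMap (pvKeep drops exactly the filtered items)
lemma filterMap_filter (l : List (List (String × String))) :
    (l.filter (fun item => PySem.Dict.getD (PySem.Dict.mk item) "intent" "" != "HalfExtend")).filterMap pvKeep
      = l.filterMap pvKeep := by
  induction l with
  | nil => rfl
  | cons h t ih =>
    by_cases hh : PySem.Dict.getD (PySem.Dict.mk h) "intent" "" = "HalfExtend"
    · have hk : pvKeep h = none := by simp [pvKeep, hh]
      simp [List.filter_cons, List.filterMap_cons, hh, hk, ih]
    · simp [List.filter_cons, List.filterMap_cons, hh, ih]

-- ===== VERDICT (by name: the statement is the Claim_ definition above) =====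
theorem process_intents_spec : Claim_equal_process_intents := by
  intro data _ _
  unfold Spec_process_intents process_intents process_intents_alt
  simp only [a_eq_filterMap, b_eq_filterMap, List.nil_append, filterMap_filter,
    List.filterMap_reverse, List.reverse_reverse]
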